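-- pv_equiv track=rewrite | github.com/a1928375/stamps | stamps.py | stamps
-- ===== SOURCE A (Python) =====
-- def stamps(x):
--     a,b,c=0,0,0
--     t,s=0,0
--
--     while x>(5*t+2*s+c):
--         c=c+1
--
--         while x>(5*t+2*b):
--             b=b+1
--             c=0
--             if x==5*t+2*b:
--                 s=b
--             else:
--                 s=b-1
--
--             while x>(5*a):
--                 a=a+1
--                 b=0
--                 if x==5*a:
--                     t=a
--                 else:
--                     t=a-1
--
--     return (t,s,c)
-- ===== SOURCE B (Python) =====
-- def stamps(x):
--     if x <= 0:
--         return (0, 0, 0)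
--     t = x // 5
--     r = x % 5
--     return (t, r // 2, r % 2)
-- ===== Notes on version B (the rewrite author's own statement) =====
-- stated objective: faster
-- what changed: Replaced the triple-nested counting loops with a closed-form computation: floor-divide x by the largest stamp value for t, then floor-divide and take the remainder of the rest by the middle stamp value for s and c (zeros for non-positive x).
import Mathlib
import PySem

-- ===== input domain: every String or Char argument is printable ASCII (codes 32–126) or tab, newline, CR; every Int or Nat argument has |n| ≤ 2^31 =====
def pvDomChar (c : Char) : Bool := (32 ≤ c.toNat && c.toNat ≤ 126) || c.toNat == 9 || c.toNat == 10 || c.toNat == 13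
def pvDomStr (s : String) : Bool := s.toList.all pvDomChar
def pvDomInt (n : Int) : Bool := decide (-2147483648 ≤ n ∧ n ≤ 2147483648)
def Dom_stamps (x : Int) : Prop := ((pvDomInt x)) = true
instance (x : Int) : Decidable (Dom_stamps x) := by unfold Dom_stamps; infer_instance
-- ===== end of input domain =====

-- B replaces A's triple-nested counting loops by a closed-form division (faster).

-- ===== PORT A =====
-- A's three nested while-loops, transliterated with a fuel counter that makes the
-- recursion structural (the fuel stamps passes is proved sufficient below).

-- innermost 'while x>(5*a)' loop of A: state (a, b, t)
def stampsInner : Nat → Int → Int → Int → Int → Int × Int × Int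
  | 0, _, a, b, t => (a, b, t)
  | f + 1, x, a, b, t =>
    if x > 5 * a then
      stampsInner f x (a + 1) 0 (if x = 5 * (a + 1) then a + 1 else a)
    else (a, b, t)

-- middle 'while x>(5*t+2*b)' loop of A: state (a, b, t, s, c)
def stampsMiddle : Nat → Int → Int → Int → Int → Int → Int → Int × Int × Int × Int × Int
  | 0, _, a, b, t, s, c => (a, b, t, s, c)
  | f + 1, x, a, b, t, s, c =>
    if x > 5 * t + 2 * b then
      let p := stampsInner f x a (b + 1) t
      stampsMiddle f x p.1 p.2.1 p.2.2 (if x = 5 * t + 2 * (b + 1) then b + 1 else b) 0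
    else (a, b, t, s, c)

-- outer 'while x>(5*t+2*s+c)' loop of A
def stampsOuter : Nat → Int → Int → Int → Int → Int → Int → Int × Int × Int × Int × Int
  | 0, _, a, b, t, s, c => (a, b, t, s, c)
  | f + 1, x, a, b, t, s, c =>
    if x > 5 * t + 2 * s + c then
      let p := stampsMiddle f x a b t s (c + 1)
      stampsOuter f x p.1 p.2.1 p.2.2.1 p.2.2.2.1 p.2.2.2.2
    else (a, b, t, s, c)

def stamps (x : Int) : List Int :=
  match stampsOuter (x.toNat + 10) x 0 0 0 0 0 with
  | (_, _, t, s, c) => [t, s, c]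

-- ===== PORT B =====
def stamps_alt (x : Int) : List Int :=
  if x ≤ 0 then [0, 0, 0]
  else
    let t := PySem.Int.floordiv x 5
    let r := PySem.Int.mod x 5
    [t, PySem.Int.floordiv r 2, PySem.Int.mod r 2]

-- ===== PRECONDITION & SPEC =====
def Spec_stamps (x : Int) (out : List Int) : Prop := out = stamps_alt x
instance (x : Int) (out : List Int) : Decidable (Spec_stamps x out) := by unfold Spec_stamps; infer_instance

-- ===== CLAIM (what is proved, stated in full; the proofs are below) =====
def Claim_equal_stamps : Prop := ∀ (x : Int), Dom_stamps x → Spec_stamps x (stamps x)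

-- ===== LEMMAS AND PROOFS =====

theorem stampsInner_noop (f : Nat) (x a b t : Int) (h : ¬ x > 5 * a) :
    stampsInner f x a b t = (a, b, t) := by
  cases f with
  | zero => rfl
  | succ f => rw [stampsInner, if_neg h]

theorem stampsMiddle_noop (f : Nat) (x a b t s c : Int) (h : ¬ x > 5 * t + 2 * b) :
    stampsMiddle f x a b t s c = (a, b, t, s, c) := by
  cases f with
  | zero => rfl
  | succ f => rw [stampsMiddle, if_neg h]

theorem stampsOuter_noop (f : Nat) (x a b t s c : Int) (h : ¬ x > 5 * t + 2 * s + c) :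
    stampsOuter f x a b t s c = (a, b, t, s, c) := by
  cases f with
  | zero => rfl
  | succ f => rw [stampsOuter, if_neg h]

-- with enough fuel, the inner loop runs to completion: it stops at the least
-- multiple-of-5 bound A, setting b to 0 and t to the floor quotient
theorem stampsInner_run : ∀ (f : Nat) (x a b t : Int), (x - 5 * a).toNat ≤ f → 5 * a < x →
    ∃ A T, stampsInner f x a b t = (A, 0, T) ∧ 5 * (A - 1) < x ∧ x ≤ 5 * A ∧
      T = if x = 5 * A then A else A - 1 := by
  intro f
  induction f with
  | zero => intro x a b t hn h; omega
  | succ f ih =>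
    intro x a b t hn h
    rw [stampsInner, if_pos h]
    by_cases h2 : 5 * (a + 1) < x
    · exact ih x (a + 1) 0 _ (by omega) h2
    · rw [stampsInner_noop _ _ _ _ _ (by omega)]
      refine ⟨a + 1, _, rfl, by omega, by omega, ?_⟩
      by_cases h5 : x = 5 * (a + 1) <;> simp [h5]

theorem stamps_eq (x : Int) : stamps x = stamps_alt x := by
  by_cases hx : x ≤ 0
  · unfold stamps
    rw [stampsOuter_noop _ _ _ _ _ _ _ (by omega)]
    simp [stamps_alt, hx]
  · have hxpos : 0 < x := by omega
    -- compute the alt side once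
    have hB : stamps_alt x = [x / 5, x % 5 / 2, x % 5 % 2] := by
      unfold stamps_alt
      rw [if_neg (by omega)]
      simp only [PySem.Int.floordiv_eq_ediv_of_pos (by omega : (0:Int) < 5),
        PySem.Int.mod_eq_emod_of_pos (by omega : (0:Int) < 5),
        PySem.Int.floordiv_eq_ediv_of_pos (by omega : (0:Int) < 2),
        PySem.Int.mod_eq_emod_of_pos (by omega : (0:Int) < 2)]
    rw [hB]
    obtain ⟨A, T, hInner, hA1, hA2, hTdef⟩ :=
      stampsInner_run (x.toNat + 8) x 0 (0 + 1) 0 (by omega) (by omega)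
    have hTb : 0 ≤ x - 5 * T ∧ x - 5 * T ≤ 4 ∧ (x = 5 * T ↔ x = 5 * A) := by
      refine ⟨?_, ?_, ?_⟩ <;> rw [hTdef] <;> split <;> omega
    unfold stamps
    rw [stampsOuter, if_pos (by omega : x > 5 * 0 + 2 * 0 + 0)]
    dsimp only
    rw [stampsMiddle, if_pos (by omega : x > 5 * 0 + 2 * 0)]
    dsimp only
    rw [hInner]
    dsimp only
    -- now at stampsMiddle (x.toNat+8) x A 0 T s1 0, s1 = if x = 5*0+2*(0+1) then 0+1 else 0
    have hr : x - 5 * T = 0 ∨ x - 5 * T = 1 ∨ x - 5 * T = 2 ∨ x - 5 * T = 3 ∨ x - 5 * T = 4 := by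
      omega
    rcases hr with hr | hr | hr | hr | hr
    · -- r = 0 : x = 5*T, so x ≥ 5 and x ≠ 2
      rw [stampsMiddle_noop _ _ _ _ _ _ _ (by omega)]
      dsimp only
      rw [if_neg (by omega : ¬ x = 5 * 0 + 2 * (0 + 1))]
      rw [stampsOuter_noop _ _ _ _ _ _ _ (by omega)]
      dsimp only
      simp only [List.cons.injEq, and_true]
      omega
    · -- r = 1
      rw [stampsMiddle, if_pos (by omega : x > 5 * T + 2 * 0)]
      dsimp only
      rw [stampsInner_noop _ x A (0 + 1) T (by omega)]
      dsimp only
      rw [stampsMiddle_noop _ _ _ _ _ _ _ (by omega : ¬ x > 5 * T + 2 * (0 + 1))]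
      dsimp only
      rw [if_neg (by omega : ¬ x = 5 * T + 2 * (0 + 1))]
      rw [stampsOuter, if_pos (by omega : x > 5 * T + 2 * 0 + 0)]
      dsimp only
      rw [stampsMiddle_noop _ x A (0 + 1) T 0 (0 + 1) (by omega)]
      dsimp only
      rw [stampsOuter_noop _ _ _ _ _ _ _ (by omega)]
      dsimp only
      simp only [List.cons.injEq, and_true]
      omega
    · -- r = 2
      rw [stampsMiddle, if_pos (by omega : x > 5 * T + 2 * 0)]
      dsimp only
      rw [stampsInner_noop _ x A (0 + 1) T (by omega)]
      dsimp only
      rw [stampsMiddle_noop _ _ _ _ _ _ _ (by omega : ¬ x > 5 * T + 2 * (0 + 1))]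
      dsimp only
      rw [if_pos (by omega : x = 5 * T + 2 * (0 + 1))]
      rw [stampsOuter_noop _ _ _ _ _ _ _ (by omega)]
      dsimp only
      simp only [List.cons.injEq, and_true]
      omega
    · -- r = 3
      rw [stampsMiddle, if_pos (by omega : x > 5 * T + 2 * 0)]
      dsimp only
      rw [stampsInner_noop _ x A (0 + 1) T (by omega)]
      dsimp only
      rw [stampsMiddle, if_pos (by omega : x > 5 * T + 2 * (0 + 1))]
      dsimp only
      rw [stampsInner_noop _ x A (0 + 1 + 1) T (by omega)]
      dsimp only
      rw [stampsMiddle_noop _ _ _ _ _ _ _ (by omega : ¬ x > 5 * T + 2 * (0 + 1 + 1))]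
      dsimp only
      rw [if_neg (by omega : ¬ x = 5 * T + 2 * (0 + 1 + 1))]
      rw [stampsOuter, if_pos (by omega : x > 5 * T + 2 * (0 + 1) + 0)]
      dsimp only
      rw [stampsMiddle_noop _ x A (0 + 1 + 1) T (0 + 1) (0 + 1) (by omega)]
      dsimp only
      rw [stampsOuter_noop _ _ _ _ _ _ _ (by omega)]
      dsimp only
      simp only [List.cons.injEq, and_true]
      omega
    · -- r = 4
      rw [stampsMiddle, if_pos (by omega : x > 5 * T + 2 * 0)]
      dsimp only
      rw [stampsInner_noop _ x A (0 + 1) T (by omega)]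
      dsimp only
      rw [stampsMiddle, if_pos (by omega : x > 5 * T + 2 * (0 + 1))]
      dsimp only
      rw [stampsInner_noop _ x A (0 + 1 + 1) T (by omega)]
      dsimp only
      rw [stampsMiddle_noop _ _ _ _ _ _ _ (by omega : ¬ x > 5 * T + 2 * (0 + 1 + 1))]
      dsimp only
      rw [if_pos (by omega : x = 5 * T + 2 * (0 + 1 + 1))]
      rw [stampsOuter_noop _ _ _ _ _ _ _ (by omega)]
      dsimp only
      simp only [List.cons.injEq, and_true]
      omega

-- ===== VERDICT (by name: the statement is the Claim_ definition above) =====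
theorem stamps_spec : Claim_equal_stamps := by
  intro x _
  unfold Spec_stamps
  exact stamps_eq x
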